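-- pv_equiv track=rewrite | github.com/jordanfreud/Ev-Calcuator | main.py | _select_best_and_dk_line
-- ===== SOURCE A (Python) =====
-- def _normalize_book_name(title):
--     normalized = "".join(ch for ch in (title or "").lower() if ch.isalnum())
--     aliases = {
--         "betonline": "betonlineag",
--         "caesarssportsbook": "caesars",
--         "williamhillus": "caesars",
--     }
--     return aliases.get(normalized, normalized)
--
-- def _get_team_line_for_book(book_title, odds_home, odds_away, home_team, target_team):
--     return odds_home if target_team == home_team else odds_away
--
-- def _select_best_and_dk_line(candidate_lines, home_team, target_team):
--     best_book = None
--     best_odds = None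
--     dk_odds = None
--
--     for book_title, odds_home, odds_away in candidate_lines:
--         team_odds = _get_team_line_for_book(book_title, odds_home, odds_away, home_team, target_team)
--
--         if best_odds is None or team_odds > best_odds:
--             best_odds = team_odds
--             best_book = book_title
--
--         if _normalize_book_name(book_title) == "draftkings":
--             dk_odds = team_odds
--
--     return best_book, best_odds, dk_odds
-- ===== SOURCE B (Python) =====
-- def _norm_book(title):
--     s = "".join(c for c in (title or "").lower() if c.isalnum())
--     if s == "betonline":
--         return "betonlineag"
--     if s in ("caesarssportsbook", "williamhillus"):
--         return "caesars"
--     return s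
--
-- def _select_best_and_dk_line(candidate_lines, home_team, target_team):
--     idx = 1 if target_team == home_team else 2
--     pairs = [(line[0], line[idx]) for line in candidate_lines]
--     if pairs:
--         best_book, best_odds = max(pairs, key=lambda p: p[1])
--     else:
--         best_book = best_odds = None
--     dk_odds = next((odds for book, odds in reversed(pairs)
--                     if _norm_book(book) == "draftkings"), None)
--     return best_book, best_odds, dk_odds
-- ===== Notes on version B (the rewrite author's own statement) =====
-- stated objective: simpler
-- what changed: Replaces the single hand-rolled accumulator loop by a map to (book, team_odds) pairs, max(..., key=...) for the best line (first maximal, as A's strict comparison keeps), and a reversed-scan next(...) for the last DraftKings line; the alias dict in normalization becomes a plain if-chain.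
import Mathlib
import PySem

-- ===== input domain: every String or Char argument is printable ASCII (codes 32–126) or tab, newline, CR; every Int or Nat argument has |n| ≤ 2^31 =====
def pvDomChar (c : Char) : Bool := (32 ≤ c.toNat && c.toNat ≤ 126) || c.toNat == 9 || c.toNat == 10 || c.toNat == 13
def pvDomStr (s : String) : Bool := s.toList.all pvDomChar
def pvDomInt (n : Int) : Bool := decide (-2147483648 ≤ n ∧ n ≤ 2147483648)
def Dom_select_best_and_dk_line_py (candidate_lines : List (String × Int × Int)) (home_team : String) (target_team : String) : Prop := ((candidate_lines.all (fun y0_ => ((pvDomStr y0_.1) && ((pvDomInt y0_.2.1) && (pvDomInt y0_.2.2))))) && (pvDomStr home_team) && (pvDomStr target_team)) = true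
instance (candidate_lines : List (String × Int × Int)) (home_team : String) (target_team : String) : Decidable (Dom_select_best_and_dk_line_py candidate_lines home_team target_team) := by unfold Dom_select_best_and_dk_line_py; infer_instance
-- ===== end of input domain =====

-- B maps to (book, team_odds) pairs, takes max-by-key for the best line and a
-- reversed-scan first match for the last DraftKings line; objective: simpler.


-- ===== PORT A =====
-- ch.isalnum(): exact on the printable-ASCII domain (Python's isalnum = [0-9A-Za-z] there)
def pyIsAlnum (c : Char) : Bool := c.isAlpha || c.isDigit

-- `(title or "")` is the identity on strings, so the port reads `title` directly
def normalize_book_name_py (title : String) : String :=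
  let normalized := String.mk ((PySem.Str.lower title).toList.filter pyIsAlnum)
  let aliases : PySem.Dict String String :=
    ((PySem.Dict.empty.insert "betonline" "betonlineag").insert
      "caesarssportsbook" "caesars").insert "williamhillus" "caesars"
  aliases.getD normalized normalized

def get_team_line_for_book_py (_book_title : String) (odds_home odds_away : Int)
    (home_team target_team : String) : Int :=
  if target_team == home_team then odds_home else odds_away

def select_best_and_dk_line_py (candidate_lines : List (String × Int × Int)) (home_team : String) (target_team : String) : Option String × Option Int × Option Int :=
  candidate_lines.foldl
    (fun st line =>
      let book_title := line.1
      let team_odds := get_team_line_for_book_py book_title line.2.1 line.2.2 home_team target_team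
      let (bb, bo, dk) := st
      let (bb', bo') :=
        match bo with
        | none => (some book_title, some team_odds)
        | some b => if team_odds > b then (some book_title, some team_odds) else (bb, bo)
      let dk' := if normalize_book_name_py book_title == "draftkings" then some team_odds else dk
      (bb', bo', dk'))
    (none, none, none)

-- ===== PORT B =====
def norm_book_alt (title : String) : String :=
  let s := String.mk ((PySem.Str.lower title).toList.filter pyIsAlnum)
  if s == "betonline" then "betonlineag"
  else if s == "caesarssportsbook" || s == "williamhillus" then "caesars"
  else s

def select_best_and_dk_line_py_alt (candidate_lines : List (String × Int × Int)) (home_team : String) (target_team : String) : Option String × Option Int × Option Int :=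
  let pairs := candidate_lines.map
    (fun line => (line.1, if target_team == home_team then line.2.1 else line.2.2))
  let (best_book, best_odds) :
      Option String × Option Int :=
    match PySem.List.max? pairs (fun p => p.2) with
    | some m => (some m.1, some m.2)
    | none => (none, none)
  let dk_odds :=
    (pairs.reverse.find? (fun p => norm_book_alt p.1 == "draftkings")).map (fun p => p.2)
  (best_book, best_odds, dk_odds)

-- ===== PRECONDITION & SPEC =====
def Spec_select_best_and_dk_line_py (candidate_lines : List (String × Int × Int)) (home_team : String) (target_team : String) (out : Option String × Option Int × Option Int) : Prop := out = select_best_and_dk_line_py_alt candidate_lines home_team target_team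
instance (candidate_lines : List (String × Int × Int)) (home_team : String) (target_team : String) (out : Option String × Option Int × Option Int) : Decidable (Spec_select_best_and_dk_line_py candidate_lines home_team target_team out) := by unfold Spec_select_best_and_dk_line_py; infer_instance

-- ===== CLAIM (what is proved, stated in full; the proofs are below) =====
def Claim_equal_select_best_and_dk_line_py : Prop := ∀ (candidate_lines : List (String × Int × Int)) (home_team : String) (target_team : String), Dom_select_best_and_dk_line_py candidate_lines home_team target_team → Spec_select_best_and_dk_line_py candidate_lines home_team target_team (select_best_and_dk_line_py candidate_lines home_team target_team)

-- ===== LEMMAS AND PROOFS =====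
lemma norm_eq (t : String) : normalize_book_name_py t = norm_book_alt t := by
  unfold normalize_book_name_py norm_book_alt
  simp only [pysem, PySem.Dict.getD, PySem.Dict.get?, PySem.Dict.insert, PySem.Dict.empty,
    PySem.Dict.contains]
  generalize String.mk (List.filter pyIsAlnum (PySem.Chars.lower t.toList)) = s
  by_cases h1 : s = "betonline"
  · subst h1; simp
  by_cases h2 : s = "caesarssportsbook"
  · subst h2; simp
  by_cases h3 : s = "williamhillus"
  · subst h3; simp
  · have e1 : ("betonline" == s) = false := beq_eq_false_iff_ne.mpr (Ne.symm h1)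
    have e2 : ("caesarssportsbook" == s) = false := beq_eq_false_iff_ne.mpr (Ne.symm h2)
    have e3 : ("williamhillus" == s) = false := beq_eq_false_iff_ne.mpr (Ne.symm h3)
    simp [e1, e2, e3, h1, h2, h3]

-- the pair-level view of A's best-so-far update (identical to PySem.List.max?'s folding step)
def maxStep (m : Option (String × Int)) (p : String × Int) : Option (String × Int) :=
  match m with
  | none => some p
  | some q => if q.2 < p.2 then some p else some q

lemma loop_eq (home_team target_team : String)
    (ls : List (String × Int × Int)) (m : Option (String × Int)) (dk : Option Int) :
    ls.foldl
      (fun st line =>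
        let book_title := line.1
        let team_odds := get_team_line_for_book_py book_title line.2.1 line.2.2 home_team target_team
        let (bb, bo, dk) := st
        let (bb', bo') :=
          match bo with
          | none => (some book_title, some team_odds)
          | some b => if team_odds > b then (some book_title, some team_odds) else (bb, bo)
        let dk' := if normalize_book_name_py book_title == "draftkings" then some team_odds else dk
        (bb', bo', dk'))
      (m.map Prod.fst, m.map Prod.snd, dk)
    = (let pairs := ls.map
        (fun line => (line.1, if target_team == home_team then line.2.1 else line.2.2));
       let m' := pairs.foldl maxStep m;
       (m'.map Prod.fst, m'.map Prod.snd,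
        ((pairs.reverse.find? (fun p => norm_book_alt p.1 == "draftkings")).map
          (fun p => p.2)).getD dk)) := by
  induction ls generalizing m dk with
  | nil => simp
  | cons x xs ih =>
    rw [List.foldl_cons]
    have hstep :
        (fun (st : Option String × Option Int × Option Int) (line : String × Int × Int) =>
          let book_title := line.1
          let team_odds := get_team_line_for_book_py book_title line.2.1 line.2.2 home_team target_team
          let (bb, bo, dk) := st
          let (bb', bo') :=
            match bo with
            | none => (some book_title, some team_odds)
            | some b => if team_odds > b then (some book_title, some team_odds) else (bb, bo)
          let dk' := if normalize_book_name_py book_title == "draftkings" then some team_odds else dk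
          (bb', bo', dk'))
          (m.map Prod.fst, m.map Prod.snd, dk) x
        = ((maxStep m (x.1, if target_team == home_team then x.2.1 else x.2.2)).map Prod.fst,
           (maxStep m (x.1, if target_team == home_team then x.2.1 else x.2.2)).map Prod.snd,
           if norm_book_alt x.1 == "draftkings"
           then some (if target_team == home_team then x.2.1 else x.2.2) else dk) := by
      cases m <;>
        simp [maxStep, get_team_line_for_book_py, norm_eq] <;> split_ifs <;> simp_all
    simp only [hstep]
    rw [
        ih (maxStep m (x.1, if target_team == home_team then x.2.1 else x.2.2))
           (if norm_book_alt x.1 == "draftkings"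
            then some (if target_team == home_team then x.2.1 else x.2.2) else dk)]
    simp only [List.map_cons, List.foldl_cons, List.reverse_cons, List.find?_append]
    cases hfind : (xs.map (fun line =>
        (line.1, if target_team == home_team then line.2.1 else line.2.2))).reverse.find?
        (fun p => norm_book_alt p.1 == "draftkings") with
    | some v => simp
    | none =>
      simp only [Option.none_or, List.find?]
      by_cases h : norm_book_alt x.1 == "draftkings" <;> simp [h]

-- ===== VERDICT (by name: the statement is the Claim_ definition above) =====
theorem select_best_and_dk_line_py_spec : Claim_equal_select_best_and_dk_line_py := by
  intro cl home target _
  unfold Spec_select_best_and_dk_line_py select_best_and_dk_line_py select_best_and_dk_line_py_alt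
  have h := loop_eq home target cl none none
  simp only [Option.map_none] at h
  rw [h]
  have hmax : ∀ (ps : List (String × Int)), ps.foldl maxStep none
      = PySem.List.max? ps (fun p => p.2) := by
    intro ps
    simp only [PySem.List.max?]
    congr 1
    funext acc p
    cases acc <;> simp [maxStep]
  rw [hmax]
  cases hm : PySem.List.max? (cl.map (fun line =>
      (line.1, if target == home then line.2.1 else line.2.2))) (fun p => p.2) <;>
    cases hfind : ((cl.map (fun line =>
        (line.1, if target == home then line.2.1 else line.2.2))).reverse.find?
        (fun p => norm_book_alt p.1 == "draftkings")) <;>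
      simp only [beq_iff_eq] at hm hfind ⊢ <;> simp [hm, hfind]
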